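-- pv_equiv track=rewrite | github.com/dolutio/KappakClient | hash.py | merge_bites
-- ===== SOURCE A (Python) =====
-- def merge_bites(ar):
--     s = ''
--     for idx, bites in enumerate(ar):
--         if idx % 3 == 0 and idx > 0:
--             bites = bites[::-1]
--
--         if idx % 9 == 0 and idx > 0:
--             s = bites + s
--
--         s += bites
--
--     s = '1' + s[1:] #The first bite is 1
--
--     return s
-- ===== SOURCE B (Python) =====
-- def merge_bites(ar):
--     # Staged, index-arithmetic reconstruction: the segments that A prepends are exactly
--     # those at positive multiples of 9, and they end up in descending index order; build
--     # that head directly from a countdown over k = (n-1)//9 .. 1, then the plain body.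
--     n = len(ar)
--     head = ''.join(ar[9 * k][::-1] for k in range((n - 1) // 9, 0, -1))
--     body = ''.join(ar[i][::-1] if i % 3 == 0 and i > 0 else ar[i] for i in range(n))
--     return '1' + (head + body)[1:]
-- ===== Notes on version B (the rewrite author's own statement) =====
-- stated objective: faster
-- what changed: Replaces A's single stateful loop (conditional in-place string prepend + append, quadratic copying) with two staged index-arithmetic passes: a countdown range k=(n-1)//9..1 builds the prepended head directly from ar[9*k][::-1], a forward range builds the body, and each is joined once.
import Mathlib
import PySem

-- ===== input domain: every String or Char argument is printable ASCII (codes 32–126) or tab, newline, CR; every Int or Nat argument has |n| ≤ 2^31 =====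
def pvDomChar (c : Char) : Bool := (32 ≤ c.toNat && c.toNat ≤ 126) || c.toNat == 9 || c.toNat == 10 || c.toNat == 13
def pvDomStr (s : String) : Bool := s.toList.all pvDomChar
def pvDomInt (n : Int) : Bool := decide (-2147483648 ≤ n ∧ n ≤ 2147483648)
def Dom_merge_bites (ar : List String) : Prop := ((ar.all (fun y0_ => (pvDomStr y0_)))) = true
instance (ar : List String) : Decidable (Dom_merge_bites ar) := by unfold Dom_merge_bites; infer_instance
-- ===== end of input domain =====

-- B replaces A's stateful prepend/append loop by two staged index-arithmetic passes: the
-- prepended segments are exactly those at positive multiples of 9, built directly by a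
-- countdown range (objective: faster — single joins instead of quadratic string accumulation; measurably faster).

-- ===== PORT A =====
-- one loop iteration of A: reverse on idx%3, prepend on idx%9, always append
def mergeBitesStepA (s : List Char) (p : Int × String) : List Char :=
  let bites := if PySem.Int.mod p.1 3 = 0 ∧ p.1 > 0 then p.2.toList.reverse else p.2.toList
  let s := if PySem.Int.mod p.1 9 = 0 ∧ p.1 > 0 then bites ++ s else s
  s ++ bites

def merge_bites (ar : List String) : String :=
  let s := (PySem.List.enumerate ar).foldl mergeBitesStepA []
  String.ofList ('1' :: PySem.List.slice s (some 1) none)   -- s = '1' + s[1:]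

-- ===== PORT B =====
-- ar[9*k] / ar[i] are always in range here, so pyGetD with default "" is exact
def merge_bites_alt (ar : List String) : String :=
  let n : Int := ar.length
  let head := ((PySem.List.pyRange (PySem.Int.floordiv (n - 1) 9) 0 (-1)).map
    (fun k => (PySem.List.pyGetD ar (9 * k) "").toList.reverse)).flatten
  let body := ((PySem.List.pyRange 0 n 1).map
    (fun i => if PySem.Int.mod i 3 = 0 ∧ i > 0
              then (PySem.List.pyGetD ar i "").toList.reverse
              else (PySem.List.pyGetD ar i "").toList)).flatten
  String.ofList ('1' :: PySem.List.slice (head ++ body) (some 1) none)   -- '1' + (head+body)[1:]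

-- ===== PRECONDITION & SPEC =====
def Spec_merge_bites (ar : List String) (out : String) : Prop := out = merge_bites_alt ar
instance (ar : List String) (out : String) : Decidable (Spec_merge_bites ar out) := by unfold Spec_merge_bites; infer_instance

-- ===== CLAIM (what is proved, stated in full; the proofs are below) =====
def Claim_equal_merge_bites : Prop := ∀ (ar : List String), Dom_merge_bites ar → Spec_merge_bites ar (merge_bites ar)

-- ===== LEMMAS AND PROOFS =====

-- the segment A computes for an enumerated pair
def pvSeg (p : Int × String) : List Char :=
  if PySem.Int.mod p.1 3 = 0 ∧ p.1 > 0 then p.2.toList.reverse else p.2.toList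

-- the characters A has prepended (descending index order) resp. appended
def pvP : List (Int × String) → List Char
  | [] => []
  | p :: l => pvP l ++ (if PySem.Int.mod p.1 9 = 0 ∧ p.1 > 0 then pvSeg p else [])

def pvAp : List (Int × String) → List Char
  | [] => []
  | p :: l => pvSeg p ++ pvAp l

theorem pvFoldInv (l : List (Int × String)) (s0 : List Char) :
    l.foldl mergeBitesStepA s0 = pvP l ++ s0 ++ pvAp l := by
  induction l generalizing s0 with
  | nil => simp [pvP, pvAp]
  | cons p l ih =>
    simp only [List.foldl_cons, ih, pvP, pvAp, mergeBitesStepA, pvSeg]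
    by_cases h9 : PySem.Int.mod p.1 9 = 0 ∧ p.1 > 0
    · rw [if_pos h9, if_pos h9]; simp
    · rw [if_neg h9, if_neg h9]; simp

theorem pvP_append (l1 l2 : List (Int × String)) :
    pvP (l1 ++ l2) = pvP l2 ++ pvP l1 := by
  induction l1 with
  | nil => simp [pvP]
  | cons p l ih => simp [pvP, ih]

theorem pvAp_eq_body (ar : List String) (l : List Int) :
    pvAp (l.map (fun j => (j, PySem.List.pyGetD ar j ""))) =
      (l.map (fun i => if PySem.Int.mod i 3 = 0 ∧ i > 0
              then (PySem.List.pyGetD ar i "").toList.reverse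
              else (PySem.List.pyGetD ar i "").toList)).flatten := by
  induction l with
  | nil => simp [pvAp]
  | cons j l ih => simp [pvAp, ih, pvSeg]

theorem pvP_eq_head (ar : List String) (b : Nat) :
    pvP ((PySem.List.pyRange 0 (b : Int) 1).map (fun j => (j, PySem.List.pyGetD ar j ""))) =
      ((PySem.List.pyRange (PySem.Int.floordiv ((b : Int) - 1) 9) 0 (-1)).map
        (fun k => (PySem.List.pyGetD ar (9 * k) "").toList.reverse)).flatten := by
  induction b with
  | zero =>
    simp only [Nat.cast_zero]
    rw [PySem.List.pyRange_one_eq_nil (by norm_num)]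
    rw [show PySem.Int.floordiv ((0 : Int) - 1) 9 = -1 by decide]
    rw [PySem.List.pyRange_neg_one_eq_nil (by norm_num)]
    simp [pvP]
  | succ b ih =>
    have hcast : ((b + 1 : Nat) : Int) = (b : Int) + 1 := by push_cast; ring
    rw [hcast, PySem.List.pyRange_one_succ_right (by positivity)]
    rw [List.map_append, pvP_append, ih]
    simp only [List.map_cons, List.map_nil]
    have hmod : PySem.Int.mod (b : Int) 9 = (b : Int) % 9 :=
      PySem.Int.mod_eq_emod_of_pos (by norm_num)
    have hfd : ∀ a : Int, PySem.Int.floordiv a 9 = a / 9 :=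
      fun a => PySem.Int.floordiv_eq_ediv_of_pos (by norm_num)
    by_cases h9 : (b : Int) % 9 = 0 ∧ (b : Int) > 0
    · -- b is a positive multiple of 9: a new segment joins the head, at the front
      have hm : ((b : Int) + 1 - 1) / 9 = ((b : Int) - 1) / 9 + 1 := by omega
      have hpos : (0 : Int) < ((b : Int) - 1) / 9 + 1 := by omega
      rw [hfd, hfd, hm, PySem.List.pyRange_neg_one_cons hpos]
      have h3 : PySem.Int.mod (b : Int) 3 = 0 := by
        rw [PySem.Int.mod_eq_emod_of_pos (by norm_num)]; omega
      have hb9 : 9 * (((b : Int) - 1) / 9 + 1) = (b : Int) := by omega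
      simp only [List.map_cons, pvP, pvSeg, List.flatten_cons, hb9]
      rw [if_pos ⟨by rw [hmod]; exact h9.1, h9.2⟩, if_pos ⟨h3, h9.2⟩]
      simp
    · -- otherwise the head is unchanged
      have hP : pvP [((b : Int), PySem.List.pyGetD ar (b : Int) "")] = [] := by
        simp only [pvP]
        rw [if_neg]
        · simp
        · rw [hmod]; exact h9
      rw [hP]
      by_cases hb0 : b = 0
      · subst hb0
        rw [hfd, hfd]
        rw [PySem.List.pyRange_neg_one_eq_nil (by omega),
            PySem.List.pyRange_neg_one_eq_nil (by omega)]
        simp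
      · have : ((b : Int) + 1 - 1) / 9 = ((b : Int) - 1) / 9 := by omega
        rw [hfd, hfd, this]
        simp

-- ===== VERDICT (by name: the statement is the Claim_ definition above) =====
theorem merge_bites_spec : Claim_equal_merge_bites := by
  intro ar _
  unfold Spec_merge_bites merge_bites merge_bites_alt
  rw [pvFoldInv]
  rw [PySem.List.enumerate_eq_map_pyRange ar ""]
  simp only [PySem.List.len_eq]
  rw [pvAp_eq_body, pvP_eq_head]
  simp
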